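-- pv_equiv track=rewrite | github.com/alexander-romanov-V/cs50p | cscircles.py | postal_validate
-- ===== SOURCE A (Python) =====
-- def postal_validate(S):
--     """Exact Postage"""
--     S = S.replace(" ", "").upper()
--     if len(S) != 6:
--         return False
--     for i in range(3):
--         if not S[i * 2].isalpha() or not S[i * 2 + 1].isdigit():
--             return False
--     return S
-- ===== SOURCE B (Python) =====
-- def postal_validate(S):
--     """Exact Postage"""
--     S = S.replace(" ", "").upper()
--     if len(S) != 6:
--         return False
--     letters = S[0::2]
--     digits = S[1::2]
--     if all(c.isalpha() for c in letters) and all(c.isdigit() for c in digits):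
--         return S
--     return False
-- ===== Notes on version B (the rewrite author's own statement) =====
-- stated objective: simpler
-- what changed: Replaces the range(3) index-arithmetic loop with two step-2 slices (even positions / odd positions) each checked wholesale with all(), keeping the same normalization and length guard.
import Mathlib
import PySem

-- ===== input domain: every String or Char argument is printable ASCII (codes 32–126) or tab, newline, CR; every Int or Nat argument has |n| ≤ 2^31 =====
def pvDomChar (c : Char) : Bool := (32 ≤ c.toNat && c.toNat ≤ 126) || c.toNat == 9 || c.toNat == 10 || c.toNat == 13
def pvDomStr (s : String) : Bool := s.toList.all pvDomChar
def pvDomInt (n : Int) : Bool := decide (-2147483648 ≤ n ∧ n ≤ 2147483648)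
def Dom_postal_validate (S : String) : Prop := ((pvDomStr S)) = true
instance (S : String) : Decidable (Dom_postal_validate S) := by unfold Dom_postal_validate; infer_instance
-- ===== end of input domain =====

-- B replaces A's index-arithmetic loop over range(3) with two step-2 slices checked wholesale.
-- Python A returns the normalized string on success (truthy, always nonempty here) and False otherwise;
-- under the Bool convention both ports return true exactly when Python returns a truthy value.

-- ===== PORT A =====
-- the 'for i in range(3)' loop with its early 'return False'; indices i*2, i*2+1 are
-- in range under the len = 6 guard, so pyGetD with a dummy default is exact here
def pvLoopA (cs : List Char) : List Int → Bool
  | [] => true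
  | i :: rest =>
    if !(PySem.Chars.isalpha (PySem.List.pyGetD cs (i * 2) ' ')) ||
       !(PySem.Chars.isdigit (PySem.List.pyGetD cs (i * 2 + 1) ' ')) then false
    else pvLoopA cs rest

def postal_validate (S : String) : Bool :=
  let cs := PySem.Chars.upper (PySem.Chars.replace S.toList [' '] [])
  if PySem.Chars.len cs ≠ 6 then false
  else pvLoopA cs (PySem.List.pyRange 0 3 1)

-- ===== PORT B =====
def postal_validate_alt (S : String) : Bool :=
  let cs := PySem.Chars.upper (PySem.Chars.replace S.toList [' '] [])
  if PySem.Chars.len cs ≠ 6 then false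
  else
    let letters := (PySem.List.slice? cs (some 0) none 2).getD []
    let digits := (PySem.List.slice? cs (some 1) none 2).getD []
    letters.all PySem.Chars.isalpha && digits.all PySem.Chars.isdigit

-- ===== PRECONDITION & SPEC =====
def Spec_postal_validate (S : String) (out : Bool) : Prop := out = postal_validate_alt S
instance (S : String) (out : Bool) : Decidable (Spec_postal_validate S out) := by unfold Spec_postal_validate; infer_instance

-- ===== CLAIM (what is proved, stated in full; the proofs are below) =====
def Claim_equal_postal_validate : Prop := ∀ (S : String), Dom_postal_validate S → Spec_postal_validate S (postal_validate S)

-- ===== LEMMAS AND PROOFS =====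
theorem pv_len6 {α : Type} (cs : List α) (h : cs.length = 6) :
    ∃ a b c d e f, cs = [a, b, c, d, e, f] := by
  match cs, h with
  | [a, b, c, d, e, f], _ => exact ⟨a, b, c, d, e, f, rfl⟩

theorem pv_core (cs : List Char) :
    (if PySem.Chars.len cs ≠ 6 then false
     else pvLoopA cs (PySem.List.pyRange 0 3 1)) =
    (if PySem.Chars.len cs ≠ 6 then false
     else ((PySem.List.slice? cs (some 0) none 2).getD []).all PySem.Chars.isalpha &&
          ((PySem.List.slice? cs (some 1) none 2).getD []).all PySem.Chars.isdigit) := by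
  by_cases h : PySem.Chars.len cs = 6
  · rw [if_neg (not_not_intro h), if_neg (not_not_intro h)]
    have hn : cs.length = 6 := by
      simp only [PySem.Chars.len_eq] at h; exact_mod_cast h
    obtain ⟨a, b, c, d, e, f, rfl⟩ := pv_len6 cs hn
    have h0 : PySem.List.slice? [a, b, c, d, e, f] (some 0) none 2 = some [a, c, e] := by
      simp [PySem.List.slice?, PySem.List.sliceIndices, List.range_succ]
    have h1 : PySem.List.slice? [a, b, c, d, e, f] (some 1) none 2 = some [b, d, f] := by
      simp [PySem.List.slice?, PySem.List.sliceIndices, List.range_succ]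
    have hr : PySem.List.pyRange 0 3 1 = [0, 1, 2] := rfl
    have g0 : PySem.List.pyGetD [a, b, c, d, e, f] (0 * 2) ' ' = a := rfl
    have g1 : PySem.List.pyGetD [a, b, c, d, e, f] (0 * 2 + 1) ' ' = b := rfl
    have g2 : PySem.List.pyGetD [a, b, c, d, e, f] (1 * 2) ' ' = c := rfl
    have g3 : PySem.List.pyGetD [a, b, c, d, e, f] (1 * 2 + 1) ' ' = d := rfl
    have g4 : PySem.List.pyGetD [a, b, c, d, e, f] (2 * 2) ' ' = e := rfl
    have g5 : PySem.List.pyGetD [a, b, c, d, e, f] (2 * 2 + 1) ' ' = f := rfl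
    rw [hr, h0, h1]
    simp only [pvLoopA, g0, g1, g2, g3, g4, g5, Option.getD_some, List.all_cons, List.all_nil]
    cases PySem.Chars.isalpha a <;> cases PySem.Chars.isdigit b <;>
      cases PySem.Chars.isalpha c <;> cases PySem.Chars.isdigit d <;>
      cases PySem.Chars.isalpha e <;> cases PySem.Chars.isdigit f <;> simp
  · rw [if_pos h, if_pos h]

-- ===== VERDICT (by name: the statement is the Claim_ definition above) =====
theorem postal_validate_spec : Claim_equal_postal_validate := by
  intro S _
  unfold Spec_postal_validate postal_validate postal_validate_alt
  exact pv_core _
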